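-- pv_equiv track=rewrite | github.com/cpark4x/amplifier-health-provider-tool | npi_client.py | _get_location_phone
-- ===== SOURCE A (Python) =====
-- from typing import Dict, List, Optional, Any
--
-- def _get_location_phone(addresses: List[Dict]) -> Optional[str]:
--     """
--     Extract phone number from location address.
--
--     Args:
--         addresses: List of address dictionaries from NPI API
--
--     Returns:
--         Phone number string or None if not found
--     """
--     if not addresses:
--         return None
--
--     # Find location address
--     for addr in addresses:
--         if addr.get("address_purpose") == "LOCATION":
--             phone = addr.get("telephone_number")
--             if phone:
--                 return phone
--
--     # Fall back to first address with phone
--     for addr in addresses: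
--         phone = addr.get("telephone_number")
--         if phone:
--             return phone
--
--     return None
-- ===== SOURCE B (Python) =====
-- def _get_location_phone(addresses):
--     """Single pass: return a LOCATION phone immediately; remember the first
--     truthy phone as fallback and return it if no LOCATION phone was found."""
--     fallback = None
--     for addr in addresses:
--         phone = addr.get("telephone_number")
--         if addr.get("address_purpose") == "LOCATION" and phone:
--             return phone
--         if fallback is None and phone:
--             fallback = phone
--     return fallback
-- ===== Notes on version B (the rewrite author's own statement) =====
-- stated objective: simpler
-- what changed: Replaced A's two sequential scans (LOCATION pass then any-phone pass) by one loop that returns a LOCATION phone immediately and keeps the first truthy phone in a fallback variable returned after the loop.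
import Mathlib
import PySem

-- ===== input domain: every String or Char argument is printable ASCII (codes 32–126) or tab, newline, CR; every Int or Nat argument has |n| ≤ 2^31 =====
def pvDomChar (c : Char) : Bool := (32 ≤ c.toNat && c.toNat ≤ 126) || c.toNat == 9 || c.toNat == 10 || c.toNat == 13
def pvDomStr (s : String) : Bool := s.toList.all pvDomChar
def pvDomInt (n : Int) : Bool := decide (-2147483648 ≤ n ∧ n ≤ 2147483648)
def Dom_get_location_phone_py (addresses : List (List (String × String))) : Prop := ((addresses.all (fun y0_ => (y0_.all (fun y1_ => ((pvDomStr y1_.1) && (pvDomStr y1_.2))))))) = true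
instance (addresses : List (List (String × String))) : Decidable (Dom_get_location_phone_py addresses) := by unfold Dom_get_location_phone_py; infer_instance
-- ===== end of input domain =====

-- B replaces A's two sequential scans by one loop with a first-phone fallback variable (objective: simpler); same cost.

-- ===== PORT A =====
-- dict.get(k): first matching key in the association list (Python dicts have unique keys)
def pvGetKey (d : List (String × String)) (k : String) : Option String :=
  match d with
  | [] => none
  | (k', v) :: rest => if k' == k then some v else pvGetKey rest k

-- truthiness of an Optional[str]: None and "" are falsy
def pvTruthy (o : Option String) : Bool :=
  match o with
  | none => false
  | some s => s != ""

-- A's first loop: for addr in addresses: if purpose == "LOCATION": phone = get; if phone: return phone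
def pvLoopA1 (addresses : List (List (String × String))) : Option String :=
  match addresses with
  | [] => none
  | a :: rest =>
    if pvGetKey a "address_purpose" == some "LOCATION" then
      let phone := pvGetKey a "telephone_number"
      if pvTruthy phone then phone else pvLoopA1 rest
    else pvLoopA1 rest

-- A's second loop: for addr in addresses: phone = get; if phone: return phone
def pvLoopA2 (addresses : List (List (String × String))) : Option String :=
  match addresses with
  | [] => none
  | a :: rest =>
    let phone := pvGetKey a "telephone_number"
    if pvTruthy phone then phone else pvLoopA2 rest

def get_location_phone_py (addresses : List (List (String × String))) : Option String :=
  if addresses == [] then none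
  else
    match pvLoopA1 addresses with
    | some p => some p
    | none => pvLoopA2 addresses

-- ===== PORT B =====
-- B's single loop carrying the fallback variable
def pvLoopB (fallback : Option String) (addresses : List (List (String × String))) : Option String :=
  match addresses with
  | [] => fallback
  | a :: rest =>
    let phone := pvGetKey a "telephone_number"
    if pvGetKey a "address_purpose" == some "LOCATION" && pvTruthy phone then phone
    else pvLoopB (if fallback == none && pvTruthy phone then phone else fallback) rest

def get_location_phone_py_alt (addresses : List (List (String × String))) : Option String :=
  pvLoopB none addresses

-- ===== PRECONDITION & SPEC =====
def Spec_get_location_phone_py (addresses : List (List (String × String))) (out : Option String) : Prop := out = get_location_phone_py_alt addresses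
instance (addresses : List (List (String × String))) (out : Option String) : Decidable (Spec_get_location_phone_py addresses out) := by unfold Spec_get_location_phone_py; infer_instance

-- ===== CLAIM (what is proved, stated in full; the proofs are below) =====
def Claim_equal_get_location_phone_py : Prop := ∀ (addresses : List (List (String × String))), Dom_get_location_phone_py addresses → Spec_get_location_phone_py addresses (get_location_phone_py addresses)

-- ===== LEMMAS AND PROOFS =====

-- ===== VERDICT (by name: the statement is the Claim_ definition above) =====
-- key invariant: B's loop with fallback fb equals A's first loop, then fb, then A's second loop
theorem pvLoopB_eq (addresses : List (List (String × String))) :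
    ∀ fb : Option String,
      pvLoopB fb addresses =
        match pvLoopA1 addresses with
        | some p => some p
        | none => match fb with
                  | some f => some f
                  | none => pvLoopA2 addresses := by
  induction addresses with
  | nil => intro fb; cases fb <;> simp [pvLoopB, pvLoopA1, pvLoopA2]
  | cons a rest ih =>
    intro fb
    simp only [pvLoopB, pvLoopA1, pvLoopA2]
    by_cases hl : pvGetKey a "address_purpose" == some "LOCATION" <;>
      by_cases ht : pvTruthy (pvGetKey a "telephone_number") <;>
        cases fb <;>
          cases hp : pvGetKey a "telephone_number" <;>
            simp_all [pvTruthy]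

theorem get_location_phone_py_spec : Claim_equal_get_location_phone_py := by
  intro addresses _
  unfold Spec_get_location_phone_py get_location_phone_py get_location_phone_py_alt
  rw [pvLoopB_eq]
  cases addresses with
  | nil => simp [pvLoopA1, pvLoopA2]
  | cons a rest => simp
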